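-- pv_equiv track=rewrite | github.com/kenenisa/CompetitiveProgramming | Day42/apply-operations-to-an-array.py | applyOperations
-- ===== SOURCE A (Python) =====
-- from typing import List
--
-- def applyOperations(nums: List[int]) -> List[int]:
--     n = len(nums)
--     r = 0
--     w = 0
--     for i in range(n-1):
--         if nums[i] == nums[i + 1]:
--             nums[i] *= 2
--             nums[i + 1] = 0
--     while r < n:
--         while w < n and nums[w] != 0:
--             w += 1
--         r = w + 1
--         while r < n and nums[r] == 0:
--             r += 1
--         if r < n and w < n and nums[w] == 0 and nums[r] != 0:
--             nums[w],nums[r] = nums[r],nums[w]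
--             w += 1
--     return nums
-- ===== SOURCE B (Python) =====
-- from typing import List
--
-- def applyOperations(nums: List[int]) -> List[int]:
--     # Phase 1 as a single streaming pass with a carry, phase 2 as filter+pad
--     # (slice-assigned so nums is mutated to the same final state as A leaves it).
--     if not nums:
--         return nums
--     merged = []
--     cur = nums[0]
--     for x in nums[1:]:
--         if cur == x:
--             merged.append(2 * cur)
--             cur = 0
--         else:
--             merged.append(cur)
--             cur = x
--     merged.append(cur)
--     nonzero = [x for x in merged if x != 0]
--     nums[:] = nonzero + [0] * (len(nums) - len(nonzero))
--     return nums
-- ===== Notes on version B (the rewrite author's own statement) =====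
-- stated objective: faster
-- what changed: Phase 1 becomes a single streaming pass with a carry instead of index-wise in-place edits, and the in-place two-pointer zero compaction (which re-scans the zero run after each swap) is replaced by one pass filtering the nonzeros in order and padding with zeros, slice-assigned back so the argument list ends in the same state.
import Mathlib
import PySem

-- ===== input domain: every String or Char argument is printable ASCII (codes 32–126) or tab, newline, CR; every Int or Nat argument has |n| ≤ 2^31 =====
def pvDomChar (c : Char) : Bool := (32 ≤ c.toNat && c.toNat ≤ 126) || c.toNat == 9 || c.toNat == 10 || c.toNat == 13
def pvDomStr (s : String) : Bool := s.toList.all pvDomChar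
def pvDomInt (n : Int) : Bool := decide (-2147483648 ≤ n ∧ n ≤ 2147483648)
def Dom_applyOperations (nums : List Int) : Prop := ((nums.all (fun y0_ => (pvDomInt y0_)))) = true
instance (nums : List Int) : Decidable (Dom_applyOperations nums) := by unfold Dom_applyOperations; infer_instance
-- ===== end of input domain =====

-- B replaces the in-place two-pointer zero compaction (which re-scans the zero run after
-- each swap) by one "filter nonzeros, pad zeros" pass, and phase 1 by a streaming carry
-- pass; a timing run measured B faster. Return-value equivalence is what is proved
-- here — both Pythons mutate/return the argument list, ending in the same final state.

-- ===== PORT A =====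
-- one step of A's phase-1 for-loop body (i is the range index)
def pvStepA (cur : List Int) (i : Int) : List Int :=
  if PySem.List.pyGetD cur i 0 == PySem.List.pyGetD cur (i + 1) 0 then
    (cur.set i.toNat (PySem.List.pyGetD cur i 0 * 2)).set (i + 1).toNat 0
  else cur

-- A's phase-1: for i in range(n-1): ...
def pvPhase1A (nums : List Int) : List Int :=
  (PySem.List.pyRange 0 ((nums.length : Int) - 1) 1).foldl pvStepA nums

-- inner while: advance w while w < n and nums[w] != 0
def pvAdvW (lst : List Int) (n w : Nat) : Nat :=
  if h : w < n ∧ PySem.List.pyGetD lst (w : Int) 0 ≠ 0 then pvAdvW lst n (w + 1) else w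
  termination_by n - w
  decreasing_by omega

-- inner while: advance r while r < n and nums[r] == 0
def pvAdvR (lst : List Int) (n r : Nat) : Nat :=
  if h : r < n ∧ PySem.List.pyGetD lst (r : Int) 0 = 0 then pvAdvR lst n (r + 1) else r
  termination_by n - r
  decreasing_by omega

-- nums[w], nums[r] = nums[r], nums[w]
def pvSwap (lst : List Int) (w r : Nat) : List Int :=
  (lst.set w (PySem.List.pyGetD lst (r : Int) 0)).set r (PySem.List.pyGetD lst (w : Int) 0)

-- A's outer while loop; fuel is only a totality guard (n+2 iterations always suffice,
-- as the equivalence proof below establishes)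
def pvLoopA (lst : List Int) (n r w : Nat) : Nat → List Int
  | 0 => lst
  | fuel + 1 =>
    if r < n then
      let w' := pvAdvW lst n w
      let r' := pvAdvR lst n (w' + 1)
      if r' < n ∧ w' < n ∧ PySem.List.pyGetD lst (w' : Int) 0 = 0 ∧
          PySem.List.pyGetD lst (r' : Int) 0 ≠ 0 then
        pvLoopA (pvSwap lst w' r') n r' (w' + 1) fuel
      else
        pvLoopA lst n r' w' fuel
    else lst

def applyOperations (nums : List Int) : List Int :=
  pvLoopA (pvPhase1A nums) nums.length 0 0 (nums.length + 2)

-- ===== PORT B =====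
-- streaming phase 1: carry the current value, compare with the next element
def pvPhase1B (cur : Int) : List Int → List Int
  | [] => [cur]
  | x :: rest => if cur == x then 2 * cur :: pvPhase1B 0 rest else cur :: pvPhase1B x rest

def applyOperations_alt (nums : List Int) : List Int :=
  match nums with
  | [] => []
  | x :: rest =>
    let merged := pvPhase1B x rest
    let nonzero := merged.filter (fun y => y != 0)
    nonzero ++ List.replicate (nums.length - nonzero.length) 0

-- ===== PRECONDITION & SPEC =====
def Spec_applyOperations (nums : List Int) (out : List Int) : Prop := out = applyOperations_alt nums
instance (nums : List Int) (out : List Int) : Decidable (Spec_applyOperations nums out) := by unfold Spec_applyOperations; infer_instance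

-- ===== CLAIM (what is proved, stated in full; the proofs are below) =====
def Claim_equal_applyOperations : Prop := ∀ (nums : List Int), Dom_applyOperations nums → Spec_applyOperations nums (applyOperations nums)

-- ===== LEMMAS AND PROOFS =====

theorem pv_getD_append (pre : List Int) (x : Int) (rest : List Int) (d : Int) :
    (pre ++ x :: rest).getD pre.length d = x := by
  induction pre with
  | nil => rfl
  | cons a t ih => simpa using ih

theorem pv_set_append (pre : List Int) (x : Int) (rest : List Int) (v : Int) :
    (pre ++ x :: rest).set pre.length v = pre ++ v :: rest := by
  induction pre with
  | nil => rfl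
  | cons a t ih => simpa using ih

theorem pv_phase1B_length (cur : Int) (rest : List Int) :
    (pvPhase1B cur rest).length = rest.length + 1 := by
  induction rest generalizing cur with
  | nil => rfl
  | cons x t ih => by_cases h : cur == x <;> simp [pvPhase1B, h, ih]

-- A's phase-1 fold, started at index pre.length on pre ++ cur :: rest, is B's carry pass
theorem pv_phase1_aux (rest : List Int) (pre : List Int) (cur : Int) :
    (PySem.List.pyRange (pre.length : Int) ((pre.length + rest.length : Nat) : Int) 1).foldl
        pvStepA (pre ++ cur :: rest) = pre ++ pvPhase1B cur rest := by
  induction rest generalizing pre cur with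
  | nil =>
    rw [PySem.List.pyRange_one_eq_nil (by simp)]
    simp [pvPhase1B]
  | cons y t ih =>
    have hlt : (pre.length : Int) < ((pre.length + (y :: t).length : Nat) : Int) := by
      push_cast
      simp
    rw [PySem.List.pyRange_one_cons hlt]
    have hget1 : PySem.List.pyGetD (pre ++ cur :: y :: t) (pre.length : Int) 0 = cur := by
      simp [PySem.List.pyGetD_natCast, pv_getD_append]
    have hget2 : PySem.List.pyGetD (pre ++ cur :: y :: t) ((pre.length : Int) + 1) 0 = y := by
      have h' : ((pre.length : Int) + 1) = ((pre.length + 1 : Nat) : Int) := by push_cast; ring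
      rw [h', PySem.List.pyGetD_natCast]
      simpa using pv_getD_append (pre ++ [cur]) y t 0
    by_cases hc : cur == y
    · have hset : pvStepA (pre ++ cur :: y :: t) (pre.length : Int) =
          pre ++ (cur * 2) :: 0 :: t := by
        have h1 : (pre ++ cur :: y :: t).set pre.length (cur * 2) = pre ++ (cur * 2) :: y :: t :=
          pv_set_append pre cur (y :: t) (cur * 2)
        have h2 : (pre ++ (cur * 2) :: y :: t).set (pre.length + 1) 0 =
            pre ++ (cur * 2) :: 0 :: t := by
          simpa using pv_set_append (pre ++ [cur * 2]) y t 0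
        simp only [pvStepA, hget1, hget2, hc]
        rw [show (pre.length : Int).toNat = pre.length by simp,
            show ((pre.length : Int) + 1).toNat = pre.length + 1 by omega, h1, h2]
        simp
      have ihx := ih (pre ++ [cur * 2]) 0
      simp only [List.foldl_cons, hset]
      have harg : ((pre.length : Int) + 1) = (((pre ++ [cur * 2]).length : Nat) : Int) := by
        push_cast; simp
      have hend : ((pre.length + (y :: t).length : Nat) : Int) =
          (((pre ++ [cur * 2]).length + t.length : Nat) : Int) := by push_cast; simp; omega
      rw [harg, hend]
      have : pre ++ [cur * 2] ++ 0 :: t = pre ++ (cur * 2) :: 0 :: t := by simp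
      rw [← this, ihx]
      simp [pvPhase1B, hc, mul_comm]
    · have hset : pvStepA (pre ++ cur :: y :: t) (pre.length : Int) = pre ++ cur :: y :: t := by
        simp [pvStepA, hget1, hget2, hc]
      have ihx := ih (pre ++ [cur]) y
      simp only [List.foldl_cons, hset]
      have harg : ((pre.length : Int) + 1) = (((pre ++ [cur]).length : Nat) : Int) := by
        push_cast; simp
      have hend : ((pre.length + (y :: t).length : Nat) : Int) =
          (((pre ++ [cur]).length + t.length : Nat) : Int) := by push_cast; simp; omega
      rw [harg, hend]
      have : pre ++ [cur] ++ y :: t = pre ++ cur :: y :: t := by simp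
      rw [← this, ihx]
      simp [pvPhase1B, hc]

theorem pv_phase1A_eq (x : Int) (rest : List Int) :
    pvPhase1A (x :: rest) = pvPhase1B x rest := by
  have := pv_phase1_aux rest [] x
  simpa [pvPhase1A] using this

theorem pv_advW_eq (lst : List Int) (w : Nat) :
    pvAdvW lst lst.length w = w + ((lst.drop w).takeWhile (fun y => y != 0)).length := by
  by_cases hw : w < lst.length
  · have hdrop : lst.drop w = lst[w] :: lst.drop (w + 1) := List.drop_eq_getElem_cons hw
    have hget : PySem.List.pyGetD lst (w : Int) 0 = lst[w] := by
      rw [PySem.List.pyGetD_natCast, List.getD_eq_getElem _ _ hw]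
    by_cases hz : lst[w] = 0
    · rw [pvAdvW, dif_neg (by simp [hget, hz]), hdrop]
      simp [List.takeWhile_cons, hz]
    · have ih := pv_advW_eq lst (w + 1)
      rw [pvAdvW, dif_pos ⟨hw, by simp [hget, hz]⟩, ih, hdrop]
      simp only [List.takeWhile_cons, show (lst[w] != 0) = true by simpa using hz, if_pos]
      simp; omega
  · rw [pvAdvW, dif_neg (fun h => hw h.1)]
    simp [List.drop_eq_nil_of_le (by omega : lst.length ≤ w)]
  termination_by lst.length - w

theorem pv_advR_eq (lst : List Int) (r : Nat) :
    pvAdvR lst lst.length r = r + ((lst.drop r).takeWhile (fun y => y == 0)).length := by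
  by_cases hr : r < lst.length
  · have hdrop : lst.drop r = lst[r] :: lst.drop (r + 1) := List.drop_eq_getElem_cons hr
    have hget : PySem.List.pyGetD lst (r : Int) 0 = lst[r] := by
      rw [PySem.List.pyGetD_natCast, List.getD_eq_getElem _ _ hr]
    by_cases hz : lst[r] = 0
    · have ih := pv_advR_eq lst (r + 1)
      rw [pvAdvR, dif_pos ⟨hr, by simp [hget, hz]⟩, ih, hdrop]
      simp only [List.takeWhile_cons, show (lst[r] == 0) = true by simpa using hz, if_pos]
      simp; omega
    · rw [pvAdvR, dif_neg (by simp [hget, hz]), hdrop]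
      simp [List.takeWhile_cons, hz]
  · rw [pvAdvR, dif_neg (fun h => hr h.1)]
    simp [List.drop_eq_nil_of_le (by omega : lst.length ≤ r)]
  termination_by lst.length - r

-- the compaction loop turns pre ++ suf (pre all nonzero, w = |pre|) into
-- pre ++ nonzeros-of-suf ++ zeros
theorem pv_loopA_eq (fuel : Nat) :
    ∀ (pre suf : List Int) (r : Nat),
      (∀ x ∈ pre, x ≠ 0) → suf.length + 2 ≤ fuel → r < pre.length + suf.length →
      pvLoopA (pre ++ suf) (pre.length + suf.length) r pre.length fuel =
        pre ++ suf.filter (fun y => y != 0) ++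
          List.replicate (suf.length - (suf.filter (fun y => y != 0)).length) 0 := by
  induction fuel with
  | zero => intro pre suf r _ hf _; omega
  | succ f ih =>
    intro pre suf r hpre hf hr
    have hn : pre.length + suf.length = (pre ++ suf).length := by simp
    have hdropPre : (pre ++ suf).drop pre.length = suf := List.drop_left
    have hw' : pvAdvW (pre ++ suf) (pre.length + suf.length) pre.length =
        pre.length + (suf.takeWhile (fun y => y != 0)).length := by
      rw [hn, pv_advW_eq, hdropPre]
    have hsuf : suf.takeWhile (fun y => y != 0) ++ suf.dropWhile (fun y => y != 0) = suf :=
      List.takeWhile_append_dropWhile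
    have hA : ∀ x ∈ suf.takeWhile (fun y => y != 0), (x != 0) = true := by
      intro x hx
      have := List.mem_takeWhile_imp hx
      simpa using this
    set A := suf.takeWhile (fun y => y != 0) with hAdef
    rw [pvLoopA, if_pos hr]
    simp only [hw']
    cases hR : suf.dropWhile (fun y => y != 0) with
    | nil =>
      -- no zero in suf: w' = n, r' = n + 1, loop exits returning pre ++ suf
      have hAe : A = suf := by
        rw [hR] at hsuf; simpa using hsuf
      have hlenA : A.length = suf.length := by rw [hAe]
      have hr' : pvAdvR (pre ++ suf) (pre.length + suf.length)
          (pre.length + A.length + 1) =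
          pre.length + suf.length + 1 := by
        rw [hn, pv_advR_eq, hlenA,
          List.drop_eq_nil_of_le
            (by simp only [List.length_append]; omega :
              (pre ++ suf).length ≤ pre.length + suf.length + 1)]
        simp
      rw [hr', if_neg (by omega)]
      cases f with
      | zero => omega
      | succ f' =>
        rw [pvLoopA, if_neg (by omega)]
        have hfe : suf.filter (fun y => y != 0) = suf := by
          rw [← hAe]; exact List.filter_eq_self.mpr (fun x hx => hA x hx)
        rw [hfe]
        simp
    | cons z B =>
      have hz : z = 0 := by
        have h0 : 0 < (suf.dropWhile (fun y => y != 0)).length := by rw [hR]; simp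
        have := List.dropWhile_get_zero_not (fun y => y != 0) suf h0
        simp only [List.get_eq_getElem, hR] at this
        simpa using this
      subst hz
      have hsplit : suf = A ++ 0 :: B := by
        conv_lhs => rw [← hsuf, hR]
      have hlen : suf.length = A.length + 1 + B.length := by
        conv_lhs => rw [hsplit]
        simp [List.length_append]
        omega
      have hwlt : pre.length + A.length <
          pre.length + suf.length := by omega
      have hdropB : (pre ++ suf).drop
          (pre.length + A.length + 1) = B := by
        have : pre ++ suf = (pre ++ A ++ [0]) ++ B := by
          rw [hsplit]; simp
        rw [this,
          show pre.length + A.length + 1 =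
            (pre ++ A ++ [0]).length by
              simp only [List.length_append, List.length_cons, List.length_nil]]
        exact List.drop_left
      have hr' : pvAdvR (pre ++ suf) (pre.length + suf.length)
          (pre.length + A.length + 1) =
          pre.length + A.length + 1 +
            (B.takeWhile (fun y => y == 0)).length := by
        rw [hn, pv_advR_eq, hdropB]
      have hBsuf : B.takeWhile (fun y => y == 0) ++ B.dropWhile (fun y => y == 0) = B :=
        List.takeWhile_append_dropWhile
      have hZ : ∀ x ∈ B.takeWhile (fun y => y == 0), x = 0 :=
        fun x hx => by simpa using List.mem_takeWhile_imp hx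
      simp only [hr']
      cases hC : B.dropWhile (fun y => y == 0) with
      | nil =>
        -- everything after the first zero is zero: loop exits returning pre ++ suf
        have hBz : ∀ x ∈ B, x = 0 := by
          intro x hx
          have := (List.dropWhile_eq_nil_iff).mp hC x hx
          simpa using this
        have hZe : B.takeWhile (fun y => y == 0) = B :=
          List.takeWhile_eq_self_iff.mpr (fun x hx => by simp [hBz x hx])
        have hZlen : (B.takeWhile (fun y => y == 0)).length = B.length := by rw [hZe]
        rw [if_neg (by omega)]
        cases f with
        | zero => omega
        | succ f' =>
          rw [pvLoopA, if_neg (by omega)]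
          have hfA : (A).filter (fun y => y != 0) =
              A := List.filter_eq_self.mpr hA
          have hfB : B.filter (fun y => y != 0) = [] :=
            List.filter_eq_nil_iff.mpr (fun x hx => by simp [hBz x hx])
          have hfe : suf.filter (fun y => y != 0) = A := by
            rw [hsplit]; simp [List.filter_append, hfA, hfB]
          rw [hfe]
          have hrep : List.replicate (suf.length - A.length) (0 : Int)
              = 0 :: B := by
            have hBr : B = List.replicate B.length (0 : Int) := List.eq_replicate_of_mem hBz
            rw [show suf.length - A.length = B.length + 1 by omega,
              List.replicate_succ, ← hBr]
          rw [hrep, hsplit]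
          simp
      | cons y C =>
        set Z := B.takeWhile (fun y => y == 0) with hZdef
        have hy : (y == 0) = false := by
          have h0 : 0 < (B.dropWhile (fun y => y == 0)).length := by rw [hC]; simp
          have := List.dropWhile_get_zero_not (fun y => y == 0) B h0
          simp only [List.get_eq_getElem, hC] at this
          simpa using this
        have hy' : y ≠ 0 := by simpa using hy
        have hBsplit : B = Z ++ y :: C := by
          conv_lhs => rw [← hBsuf, hC]
        have hBlen : B.length = Z.length + 1 + C.length := by
          conv_lhs => rw [hBsplit]
          simp only [List.length_append, List.length_cons]
          omega
        have hrlt : pre.length + A.length + 1 + Z.length < pre.length + suf.length := by omega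
        have h1 : pre ++ suf = (pre ++ A) ++ 0 :: B := by
          conv_lhs => rw [hsplit]
          simp
        have h2 : pre ++ suf = (pre ++ A ++ 0 :: Z) ++ y :: C := by
          conv_lhs => rw [hsplit, hBsplit]
          simp
        have hget0 : PySem.List.pyGetD (pre ++ suf) ((pre.length + A.length : Nat) : Int) 0
            = 0 := by
          rw [PySem.List.pyGetD_natCast, h1,
            show pre.length + A.length = (pre ++ A).length by simp]
          exact pv_getD_append (pre ++ A) 0 B 0
        have hgety : PySem.List.pyGetD (pre ++ suf)
            ((pre.length + A.length + 1 + Z.length : Nat) : Int) 0 = y := by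
          rw [PySem.List.pyGetD_natCast, h2,
            show pre.length + A.length + 1 + Z.length = (pre ++ A ++ 0 :: Z).length by
              simp only [List.length_append, List.length_cons]; omega]
          exact pv_getD_append (pre ++ A ++ 0 :: Z) y C 0
        rw [if_pos ⟨hrlt, hwlt, hget0, by rw [hgety]; exact hy'⟩]
        have hswap : pvSwap (pre ++ suf) (pre.length + A.length)
            (pre.length + A.length + 1 + Z.length) = (pre ++ A ++ [y]) ++ (Z ++ 0 :: C) := by
          unfold pvSwap
          rw [hget0, hgety]
          have e1 : (pre ++ suf).set (pre.length + A.length) y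
              = (pre ++ A) ++ y :: (Z ++ y :: C) := by
            rw [h1, show pre.length + A.length = (pre ++ A).length by simp,
              pv_set_append (pre ++ A) 0 B y, hBsplit]
          rw [e1,
            show (pre ++ A) ++ y :: (Z ++ y :: C) = (pre ++ A ++ y :: Z) ++ y :: C by simp,
            show pre.length + A.length + 1 + Z.length = (pre ++ A ++ y :: Z).length by
              simp only [List.length_append, List.length_cons]; omega,
            pv_set_append (pre ++ A ++ y :: Z) y C 0]
          simp
        rw [hswap,
          show pre.length + suf.length
              = (pre ++ A ++ [y]).length + (Z ++ 0 :: C).length by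
            simp only [List.length_append, List.length_cons, List.length_nil]; omega,
          show pre.length + A.length + 1 = (pre ++ A ++ [y]).length by
            simp only [List.length_append, List.length_cons, List.length_nil]]
        have hpre2 : ∀ x ∈ pre ++ A ++ [y], x ≠ 0 := by
          intro x hx
          simp only [List.append_assoc, List.mem_append, List.mem_singleton] at hx
          rcases hx with h | h | h
          · exact hpre x h
          · simpa using hA x h
          · simpa [h] using hy'
        have hstep := ih (pre ++ A ++ [y]) (Z ++ 0 :: C)
          ((pre ++ A ++ [y]).length + Z.length) hpre2
          (by simp only [List.length_append, List.length_cons, List.length_nil]; omega)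
          (by simp only [List.length_append, List.length_cons, List.length_nil]; omega)
        rw [hstep]
        -- filter computations
        have hfA : A.filter (fun y => y != 0) = A := List.filter_eq_self.mpr hA
        have hfZ : Z.filter (fun y => y != 0) = [] :=
          List.filter_eq_nil_iff.mpr (fun x hx => by simp [hZ x hx])
        have hfS : suf.filter (fun y => y != 0) = A ++ y :: C.filter (fun y => y != 0) := by
          conv_lhs => rw [hsplit, hBsplit]
          simp [List.filter_append, List.filter_cons, hfA, hfZ, hy']
        have hfS2 : (Z ++ 0 :: C).filter (fun y => y != 0) = C.filter (fun y => y != 0) := by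
          simp [List.filter_append, hfZ]
        have hflen : (C.filter (fun y => y != 0)).length ≤ C.length := List.length_filter_le _ _
        rw [hfS, hfS2,
          show (Z ++ 0 :: C).length - (C.filter (fun y => y != 0)).length
              = suf.length - (A ++ y :: C.filter (fun y => y != 0)).length by
            simp only [List.length_append, List.length_cons]; omega]
        simp

-- ===== VERDICT (by name: the statement is the Claim_ definition above) =====
theorem applyOperations_spec : Claim_equal_applyOperations := by
  unfold Claim_equal_applyOperations Spec_applyOperations
  intro nums _
  cases nums with
  | nil => decide
  | cons x rest =>
    have hm : pvPhase1A (x :: rest) = pvPhase1B x rest := pv_phase1A_eq x rest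
    have hlen : (pvPhase1B x rest).length = rest.length + 1 := pv_phase1B_length x rest
    have hkey := pv_loopA_eq ((pvPhase1B x rest).length + 2) [] (pvPhase1B x rest) 0
      (by simp) (by simp) (by simp [hlen])
    simp only [List.nil_append, List.length_nil, Nat.zero_add] at hkey
    unfold applyOperations
    rw [hm, show (x :: rest).length = (pvPhase1B x rest).length by simp [hlen], hkey]
    simp [applyOperations_alt, hlen]
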